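-- pv_equiv track=rewrite | github.com/vseloved/prj-nlp-2020 | students/OleksandrPetrov/03-data/m2format.py | generate_uncovered_regions
-- ===== SOURCE A (Python) =====
-- import itertools
-- import collections
--
-- Region = collections.namedtuple(
--     'Region',
--     (
--         'beg',
--         'end',
--     )
-- )
--
-- def generate_uncovered_regions(coverage):
--
--     for is_covered, region_it in itertools.groupby(
--         enumerate(coverage),
--         key=lambda x: x[1] != 0,
--     ):
--         if is_covered:
--             continue
--         beg = None
--         end = None
--         for i, __ in region_it:
--             if beg is None:
--                 beg = i
--             end = i
--         assert beg is not None and end is not None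
--         yield Region(beg, end + 1)
-- ===== SOURCE B (Python) =====
-- import collections
--
-- Region = collections.namedtuple('Region', ('beg', 'end'))
--
-- def generate_uncovered_regions(coverage):
--     # one explicit pass: running begin-of-zero-run state machine (no groupby)
--     beg = None
--     last = -1
--     for i, c in enumerate(coverage):
--         last = i
--         if c == 0:
--             if beg is None:
--                 beg = i
--         else:
--             if beg is not None:
--                 yield Region(beg, i)
--                 beg = None
--     if beg is not None:
--         yield Region(beg, last + 1)
-- ===== Notes on version B (the rewrite author's own statement) =====
-- stated objective: simpler
-- what changed: Replaced itertools.groupby grouping plus an inner beg/end scan of each group by a single explicit pass over enumerate(coverage) maintaining a running start-of-zero-run state and flushing the last run after the loop.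
import Mathlib
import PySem

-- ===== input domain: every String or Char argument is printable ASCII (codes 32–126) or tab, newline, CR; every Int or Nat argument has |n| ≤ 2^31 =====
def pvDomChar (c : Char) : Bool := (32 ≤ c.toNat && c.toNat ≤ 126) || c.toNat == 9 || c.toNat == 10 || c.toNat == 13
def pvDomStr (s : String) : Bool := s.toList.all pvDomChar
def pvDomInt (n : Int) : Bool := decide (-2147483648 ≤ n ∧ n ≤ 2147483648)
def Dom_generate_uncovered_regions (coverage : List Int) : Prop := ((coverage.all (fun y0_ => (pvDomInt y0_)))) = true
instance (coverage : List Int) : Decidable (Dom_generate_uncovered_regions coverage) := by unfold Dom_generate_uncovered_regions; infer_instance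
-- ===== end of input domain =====

-- B replaces itertools.groupby + an inner per-group scan by one explicit pass with a
-- running start-of-zero-run state (objective: simpler).

-- ===== PORT A =====
-- enumerate(coverage)
def pvEnum (i : Int) : List Int → List (Int × Int)
  | [] => []
  | x :: xs => (i, x) :: pvEnum (i + 1) xs

-- itertools.groupby with key = (x[1] != 0): peel the maximal same-key run from the front
def pvGroupBy : List (Int × Int) → List (Bool × List (Int × Int))
  | [] => []
  | x :: xs =>
    let k := decide (x.2 ≠ 0)
    (k, x :: xs.takeWhile (fun y => decide (y.2 ≠ 0) == k)) ::
      pvGroupBy (xs.dropWhile (fun y => decide (y.2 ≠ 0) == k))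
termination_by l => l.length
decreasing_by
  simp only [List.length_cons]
  exact Nat.lt_succ_of_le (List.length_dropWhile_le _ _)

-- the inner 'for i, __ in region_it' loop maintaining beg (first index) and end (last index)
def pvInner (g : List (Int × Int)) : Option Int × Option Int :=
  g.foldl (fun s p => (some (s.1.getD p.1), some p.1)) (none, none)

-- 'yield Region(beg, end + 1)' (groups are nonempty, so the defaults are never used)
def pvYield (g : List (Int × Int)) : Int × Int :=
  ((pvInner g).1.getD 0, (pvInner g).2.getD 0 + 1)

def generate_uncovered_regions (coverage : List Int) : List (Int × Int) :=
  (pvGroupBy (pvEnum 0 coverage)).foldl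
    (fun out g => if g.1 then out else out ++ [pvYield g.2]) []

-- ===== PORT B =====
-- one pass, beg = start of the current zero run (none when outside a run); final flush
def pvBLoop (i : Int) (beg : Option Int) : List Int → List (Int × Int)
  | [] =>
    match beg with
    | none => []
    | some b => [(b, i)]
  | x :: xs =>
    if x = 0 then
      match beg with
      | none => pvBLoop (i + 1) (some i) xs
      | some _ => pvBLoop (i + 1) beg xs
    else
      match beg with
      | none => pvBLoop (i + 1) none xs
      | some b => (b, i) :: pvBLoop (i + 1) none xs

def generate_uncovered_regions_alt (coverage : List Int) : List (Int × Int) :=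
  pvBLoop 0 none coverage

-- ===== PRECONDITION & SPEC =====
def Spec_generate_uncovered_regions (coverage : List Int) (out : List (Int × Int)) : Prop := out = generate_uncovered_regions_alt coverage
instance (coverage : List Int) (out : List (Int × Int)) : Decidable (Spec_generate_uncovered_regions coverage out) := by unfold Spec_generate_uncovered_regions; infer_instance

-- ===== CLAIM (what is proved, stated in full; the proofs are below) =====
def Claim_equal_generate_uncovered_regions : Prop := ∀ (coverage : List Int), Dom_generate_uncovered_regions coverage → Spec_generate_uncovered_regions coverage (generate_uncovered_regions coverage)

-- ===== LEMMAS AND PROOFS =====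

-- A's foldl accumulates: it is the map of pvYield over the non-covered groups
theorem pvFoldl_step (gs : List (Bool × List (Int × Int))) (acc : List (Int × Int)) :
    gs.foldl (fun out g => if g.1 then out else out ++ [pvYield g.2]) acc
      = acc ++ (gs.filter (fun g => !g.1)).map (fun g => pvYield g.2) := by
  induction gs generalizing acc with
  | nil => simp
  | cons g gs ih =>
    cases hg : g.1 <;> simp [List.foldl_cons, hg, ih]

def pvAfilt (l : List (Int × Int)) : List (Int × Int) :=
  ((pvGroupBy l).filter (fun g => !g.1)).map (fun g => pvYield g.2)

theorem pvEnum_takeWhile (q : Int → Bool) (xs : List Int) (i : Int) :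
    (pvEnum i xs).takeWhile (fun y => q y.2) = pvEnum i (xs.takeWhile q) := by
  induction xs generalizing i with
  | nil => simp [pvEnum]
  | cons x xs ih =>
    cases hq : q x <;> simp [pvEnum, hq, ih]

theorem pvEnum_dropWhile (q : Int → Bool) (xs : List Int) (i : Int) :
    (pvEnum i xs).dropWhile (fun y => q y.2)
      = pvEnum (i + (xs.takeWhile q).length) (xs.dropWhile q) := by
  induction xs generalizing i with
  | nil => simp [pvEnum]
  | cons x xs ih =>
    cases hq : q x
    · simp [pvEnum, List.takeWhile_cons, hq]
    · simp only [pvEnum, List.takeWhile_cons, List.dropWhile_cons, hq, if_pos,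
        List.length_cons, ih]
      congr 1
      push_cast
      ring

theorem pvInner_foldl (t : List Int) (j b : Int) (e : Option Int) :
    (pvEnum j t).foldl (fun s p => (some (s.1.getD p.1), some p.1)) (some b, e)
      = (some b, if t.isEmpty then e else some (j + t.length - 1)) := by
  induction t generalizing j e with
  | nil => simp [pvEnum]
  | cons x xs ih =>
    simp only [pvEnum, List.foldl_cons, Option.getD_some, ih]
    cases xs with
    | nil => simp
    | cons y ys =>
      simp only [List.isEmpty_cons, List.length_cons, if_neg Bool.false_ne_true]
      congr 2
      push_cast
      ring

theorem pvYield_enum (x : Int) (t : List Int) (i : Int) :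
    pvYield ((i, x) :: pvEnum (i + 1) t) = (i, i + t.length + 1) := by
  simp only [pvYield, pvInner, List.foldl_cons, Option.getD_none, pvInner_foldl]
  cases t with
  | nil => simp
  | cons y ys =>
    simp only [List.isEmpty_cons, if_neg Bool.false_ne_true, List.length_cons,
      Option.getD_some, Prod.mk.injEq, true_and]
    push_cast
    ring

-- B while inside a zero run started at b: emits (b, end-of-run) then continues outside
theorem pvBLoop_some (xs : List Int) (i b : Int) :
    pvBLoop i (some b) xs
      = (b, i + (xs.takeWhile (fun z => decide (z = 0))).length)
          :: pvBLoop (i + (xs.takeWhile (fun z => decide (z = 0))).length) none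
               (xs.dropWhile (fun z => decide (z = 0))) := by
  induction xs generalizing i with
  | nil => simp [pvBLoop]
  | cons x xs ih =>
    by_cases hx : x = 0
    · subst hx
      simp only [pvBLoop, List.takeWhile_cons, List.dropWhile_cons, decide_true, if_true,
        List.length_cons, ih]
      have harith : i + 1 + ((xs.takeWhile (fun z : Int => decide (z = 0))).length : Int)
          = i + (((xs.takeWhile (fun z : Int => decide (z = 0))).length : Int) + 1) := by ring
      push_cast
      rw [harith]
    · simp [pvBLoop, hx]

-- B outside a run skips a nonzero prefix
theorem pvBLoop_none_skip (xs : List Int) (i : Int) :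
    pvBLoop i none xs
      = pvBLoop (i + (xs.takeWhile (fun z => decide (z ≠ 0))).length) none
          (xs.dropWhile (fun z => decide (z ≠ 0))) := by
  induction xs generalizing i with
  | nil => simp
  | cons x xs ih =>
    by_cases hx : x = 0
    · simp [hx]
    · have hd : decide (x ≠ 0) = true := by simp [hx]
      simp only [List.takeWhile_cons, List.dropWhile_cons, hd, if_true, List.length_cons]
      rw [show pvBLoop i none (x :: xs) = pvBLoop (i + 1) none xs from by simp [pvBLoop, hx],
        ih]
      have harith : i + 1 + ((xs.takeWhile (fun z : Int => decide (z ≠ 0))).length : Int)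
          = i + (((xs.takeWhile (fun z : Int => decide (z ≠ 0))).length : Int) + 1) := by ring
      push_cast
      rw [harith]

theorem pvGroupBy_cons (x : Int × Int) (xs : List (Int × Int)) :
    pvGroupBy (x :: xs)
      = (decide (x.2 ≠ 0), x :: xs.takeWhile (fun y => decide (y.2 ≠ 0) == decide (x.2 ≠ 0))) ::
          pvGroupBy (xs.dropWhile (fun y => decide (y.2 ≠ 0) == decide (x.2 ≠ 0))) := by
  rw [pvGroupBy]

theorem pvMain (n : Nat) : ∀ (xs : List Int), xs.length ≤ n → ∀ (i : Int),
    pvAfilt (pvEnum i xs) = pvBLoop i none xs := by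
  induction n with
  | zero =>
    intro xs h i
    have : xs = [] := List.eq_nil_of_length_eq_zero (Nat.le_zero.mp h)
    subst this
    simp [pvAfilt, pvEnum, pvGroupBy, pvBLoop]
  | succ n ih =>
    intro xs h i
    cases xs with
    | nil => simp [pvAfilt, pvEnum, pvGroupBy, pvBLoop]
    | cons x xs =>
      by_cases hx : x = 0
      · -- head is zero: the first group is an uncovered run, B opens a run at i
        subst hx
        unfold pvAfilt
        rw [show pvEnum i ((0:Int) :: xs) = ((i,(0:Int)) : Int × Int) :: pvEnum (i+1) xs from rfl,
          pvGroupBy_cons]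
        have hk : decide ((((i:Int), (0:Int)) : Int × Int).2 ≠ 0) = false := by simp
        rw [hk]
        have hpred : (fun y : Int × Int => decide (y.2 ≠ 0) == false)
            = (fun y : Int × Int => decide (y.2 = 0)) := by
          funext y
          cases hd : decide (y.2 = 0) <;> simp_all
        rw [hpred, pvEnum_takeWhile (fun z => decide (z = 0)) xs (i+1),
          pvEnum_dropWhile (fun z => decide (z = 0)) xs (i+1)]
        set t := xs.takeWhile (fun z : Int => decide (z = 0)) with ht
        set r := xs.dropWhile (fun z : Int => decide (z = 0)) with hr
        have hlen : r.length ≤ n := by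
          rw [hr]
          have := List.length_dropWhile_le (fun z : Int => decide (z = 0)) xs
          simp only [List.length_cons] at h
          omega
        simp only [List.filter_cons, Bool.not_false, if_true, List.map_cons]
        rw [show ((pvGroupBy (pvEnum (i + 1 + (t.length : Int)) r)).filter
            (fun g => !g.1)).map (fun g => pvYield g.2)
              = pvAfilt (pvEnum (i + 1 + (t.length : Int)) r) from rfl]
        rw [ih r hlen, pvYield_enum]
        rw [show pvBLoop i none ((0:Int) :: xs) = pvBLoop (i+1) (some i) xs from by
          simp [pvBLoop]]
        rw [pvBLoop_some, ← ht, ← hr]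
        have harith : i + (t.length : Int) + 1 = i + 1 + (t.length : Int) := by ring
        rw [harith]
      · -- head nonzero: the first group is covered and filtered away, B skips
        unfold pvAfilt
        rw [show pvEnum i (x :: xs) = ((i, x) : Int × Int) :: pvEnum (i+1) xs from rfl,
          pvGroupBy_cons]
        have hk : decide ((((i:Int), x) : Int × Int).2 ≠ 0) = true := by simp [hx]
        rw [hk]
        have hpred : (fun y : Int × Int => decide (y.2 ≠ 0) == true)
            = (fun y : Int × Int => decide (y.2 ≠ 0)) := by
          funext y
          simp
        rw [hpred, pvEnum_takeWhile (fun z => decide (z ≠ 0)) xs (i+1),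
          pvEnum_dropWhile (fun z => decide (z ≠ 0)) xs (i+1)]
        set t := xs.takeWhile (fun z : Int => decide (z ≠ 0)) with ht
        set r := xs.dropWhile (fun z : Int => decide (z ≠ 0)) with hr
        have hlen : r.length ≤ n := by
          rw [hr]
          have := List.length_dropWhile_le (fun z : Int => decide (z ≠ 0)) xs
          simp only [List.length_cons] at h
          omega
        simp only [List.filter_cons, Bool.not_true, Bool.false_eq_true, if_false]
        rw [show ((pvGroupBy (pvEnum (i + 1 + (t.length : Int)) r)).filter
            (fun g => !g.1)).map (fun g => pvYield g.2)
              = pvAfilt (pvEnum (i + 1 + (t.length : Int)) r) from rfl]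
        rw [ih r hlen]
        rw [show pvBLoop i none (x :: xs) = pvBLoop (i+1) none xs from by
          simp [pvBLoop, hx]]
        rw [pvBLoop_none_skip xs (i+1), ← ht, ← hr]

-- ===== VERDICT (by name: the statement is the Claim_ definition above) =====
theorem generate_uncovered_regions_spec : Claim_equal_generate_uncovered_regions := by
  intro coverage _
  unfold Spec_generate_uncovered_regions generate_uncovered_regions generate_uncovered_regions_alt
  rw [pvFoldl_step]
  simpa [pvAfilt] using pvMain coverage.length coverage le_rfl 0
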